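-- pv_equiv track=rewrite | github.com/Sharkar96/AIproject | treeManipulation.py | minimizeCliques
-- ===== SOURCE A (Python) =====
-- def minimizeCliques(cliques: list):
--     uselessCliques = []
--     for i in range(len(cliques)):
--         for j in range(len(cliques)):
--             if i != j and cliques[j].issubset(cliques[i]):
--                 uselessCliques.append(cliques[j])
--
--     for i in uselessCliques:
--         if cliques.__contains__(i):
--             cliques.remove(i)
--
--     return cliques
-- ===== SOURCE B (Python) =====
-- def minimizeCliques(cliques: list):
--     # B: canonicalize each clique to a frozenset once; keep a clique iff its frozenset is
--     # unique in the list and has no proper superset. Mutates the list in place (slice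
--     # assignment), like A mutates via remove; same return value.
--     sets = [frozenset(c) for c in cliques]
--     kept = [c for c, f in zip(cliques, sets)
--             if sets.count(f) == 1 and not any(f < g for g in sets)]
--     cliques[:] = kept
--     return cliques
-- ===== Notes on version B (the rewrite author's own statement) =====
-- stated objective: alternative
-- what changed: B canonicalizes each clique to a frozenset once and keeps a clique iff that frozenset occurs exactly once and has no proper superset, replacing A's index-pair scan with non-strict subset tests followed by a gather-useless-then-remove-by-value phase; duplicates are handled by counting canonical sets instead of the i!=j mutual-subset trick, and the whole remove-by-value phase (repeated __contains__/remove scans) disappears.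
import Mathlib
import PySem

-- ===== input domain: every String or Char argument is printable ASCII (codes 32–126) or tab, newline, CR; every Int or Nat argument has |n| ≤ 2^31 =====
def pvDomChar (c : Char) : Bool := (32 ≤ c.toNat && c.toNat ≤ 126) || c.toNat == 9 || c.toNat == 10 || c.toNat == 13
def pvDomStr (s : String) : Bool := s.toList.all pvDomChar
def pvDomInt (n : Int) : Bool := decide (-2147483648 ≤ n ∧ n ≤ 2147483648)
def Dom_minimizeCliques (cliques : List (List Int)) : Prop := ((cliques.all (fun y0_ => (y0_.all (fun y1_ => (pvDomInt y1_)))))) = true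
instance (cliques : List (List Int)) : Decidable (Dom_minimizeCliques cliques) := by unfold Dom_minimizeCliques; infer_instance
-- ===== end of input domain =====

-- B canonicalizes each clique to a frozenset once and keeps a clique iff that frozenset is unique
-- and has no proper superset, instead of A's index-pair subset scan followed by gather-then-remove
-- (objective: alternative). Both A and B mutate the passed list in place (A via remove, B via slice
-- assignment); the equivalence proved here is about the RETURN value (which for both equals the
-- final state of the list).

-- ===== PORT A =====
-- cliques.remove(u): drop the first element == u, with Python's set equality (PySem.Set.equal); exact,
-- since the elements are sets.  (The ValueError case is unreachable: A guards with __contains__.)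
def removeFirstSet (cs : List (List Int)) (u : List Int) : List (List Int) :=
  match cs with
  | [] => []
  | c :: t => if PySem.Set.equal c u then t else c :: removeFirstSet t u

def minimizeCliques (cliques : List (List Int)) : List (List Int) :=
  -- for i in range(len(cliques)): for j in range(len(cliques)): … append  (indices of range(len) are
  -- always in range, so plain Nat indexing with getD is exact here)
  let useless := (List.range cliques.length).foldl (fun acc i =>
    (List.range cliques.length).foldl (fun acc j =>
      if i ≠ j ∧ PySem.Set.issubset (cliques.getD j []) (cliques.getD i []) = true
      then acc ++ [cliques.getD j []] else acc) acc) []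
  -- for i in uselessCliques: if cliques.__contains__(i): cliques.remove(i)   (== on sets = Set.equal)
  useless.foldl (fun cs u =>
    if cs.any (fun c => PySem.Set.equal c u) then removeFirstSet cs u else cs) cliques

-- ===== PORT B =====
-- frozenset(c), modelled by its canonical representative: the sorted list of c's distinct elements.
-- Exact for everything Source B does with the frozensets (== and <, i.e. list equality of canonical
-- forms = Python frozenset equality, and Set.issubset on them = Python's subset test).
def pvFz (c : List Int) : List Int := PySem.List.sorted (PySem.Set.ofList c) (fun x => x) false

def minimizeCliques_alt (cliques : List (List Int)) : List (List Int) :=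
  -- sets = [frozenset(c) for c in cliques]
  let sets := cliques.map pvFz
  -- kept = [c for c, f in zip(cliques, sets) if sets.count(f) == 1 and not any(f < g for g in sets)]
  ((cliques.zip sets).filter (fun p =>
      (sets.count p.2 == 1) &&
        ! sets.any (fun g => PySem.Set.issubset p.2 g && !(p.2 == g)))).map (fun p => p.1)

-- ===== PRECONDITION & SPEC =====
def Spec_minimizeCliques (cliques : List (List Int)) (out : List (List Int)) : Prop := out = minimizeCliques_alt cliques
instance (cliques : List (List Int)) (out : List (List Int)) : Decidable (Spec_minimizeCliques cliques out) := by unfold Spec_minimizeCliques; infer_instance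

-- ===== CLAIM (what is proved, stated in full; the proofs are below) =====
def Claim_equal_minimizeCliques : Prop := ∀ (cliques : List (List Int)), Dom_minimizeCliques cliques → Spec_minimizeCliques cliques (minimizeCliques cliques)

-- ===== LEMMAS AND PROOFS =====

-- the element at position i (all accesses are in range)
def pvG (cliques : List (List Int)) (i : Nat) : List Int := cliques.getD i []

-- value-level characterisation of the cliques A's algorithm removes: c is "bad" iff some clique that is
-- not set-equal to c is a superset of c, or c's set-equality class occurs at least twice in the list
def pvBad (cliques : List (List Int)) (c : List Int) : Bool :=
  decide ((∃ i < cliques.length, PySem.Set.issubset c (pvG cliques i) = true ∧ ¬ (PySem.Set.equal c (pvG cliques i) = true))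
    ∨ 2 ≤ cliques.countP (fun d => PySem.Set.equal d c))

theorem pvBadT (cliques : List (List Int)) (c : List Int) :
    pvBad cliques c = true ↔
      ((∃ i < cliques.length, PySem.Set.issubset c (pvG cliques i) = true ∧ ¬ (PySem.Set.equal c (pvG cliques i) = true))
        ∨ 2 ≤ cliques.countP (fun d => PySem.Set.equal d c)) := by
  simp [pvBad]

-- ---- basic facts about Set.equal / Set.issubset ----
theorem pvEqv_refl (a : List Int) : PySem.Set.equal a a = true := by
  rw [PySem.Set.equal_iff]; intro x; rfl

theorem pvEqv_symm {a b : List Int} (h : PySem.Set.equal a b = true) : PySem.Set.equal b a = true := by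
  rw [PySem.Set.equal_iff] at h ⊢; intro x; exact (h x).symm

theorem pvEqv_trans {a b c : List Int} (h1 : PySem.Set.equal a b = true)
    (h2 : PySem.Set.equal b c = true) : PySem.Set.equal a c = true := by
  rw [PySem.Set.equal_iff] at h1 h2 ⊢; intro x; exact (h1 x).trans (h2 x)

theorem pvSub_of_eqv_left {a b x : List Int} (h : PySem.Set.equal a b = true)
    (hs : PySem.Set.issubset b x = true) : PySem.Set.issubset a x = true := by
  rw [PySem.Set.equal_iff] at h; rw [PySem.Set.issubset_iff] at hs ⊢
  intro y hy; exact hs y ((h y).mp hy)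

theorem pvSub_of_eqv {a b : List Int} (h : PySem.Set.equal a b = true) :
    PySem.Set.issubset a b = true := by
  rw [PySem.Set.equal_iff] at h; rw [PySem.Set.issubset_iff]
  intro y hy; exact (h y).mp hy

-- pvBad respects set-equality
theorem pvBad_respects {cliques : List (List Int)} {a b : List Int}
    (h : PySem.Set.equal a b = true) (hb : pvBad cliques a = true) : pvBad cliques b = true := by
  rw [pvBadT] at hb ⊢
  rcases hb with ⟨i, hi, hs, hne⟩ | hc
  · exact Or.inl ⟨i, hi, pvSub_of_eqv_left (pvEqv_symm h) hs,
      fun he => hne (pvEqv_trans h he)⟩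
  · refine Or.inr ?_
    calc 2 ≤ cliques.countP (fun d => PySem.Set.equal d a) := hc
      _ = cliques.countP (fun d => PySem.Set.equal d b) := by
            apply List.countP_congr; intro d _
            constructor
            · intro hd; exact pvEqv_trans hd h
            · intro hd; exact pvEqv_trans hd (pvEqv_symm h)

-- ---- positional counting ----
theorem pvCountP_eq_range {α : Type} (xs : List α) (p : α → Bool) (d : α) :
    xs.countP p = ((List.range xs.length).countP (fun i => p (xs.getD i d))) := by
  induction xs using List.reverseRecOn with
  | nil => simp
  | append_singleton xs x ih =>
    rw [List.countP_append, List.length_append, List.length_singleton, List.range_succ,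
        List.countP_append]
    have h1 : (List.range xs.length).countP (fun i => p ((xs ++ [x]).getD i d))
        = (List.range xs.length).countP (fun i => p (xs.getD i d)) := by
      apply List.countP_congr
      intro i hi
      rw [List.getD_append _ _ _ _ (List.mem_range.mp hi)]
    have h2 : (xs ++ [x]).getD xs.length d = x := by
      simp [List.getD_eq_getElem?_getD]
    rw [h1, ih, List.countP_cons, List.countP_cons, List.countP_nil, h2]; simp

theorem pvTwo_mem_length {α : Type} {l : List α} {a b : α} (ha : a ∈ l) (hb : b ∈ l)
    (hne : a ≠ b) : 2 ≤ l.length := by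
  match l with
  | [] => cases ha
  | [x] => simp at ha hb; subst ha; subst hb; exact absurd rfl hne
  | x :: y :: t => simp

theorem pvTwo_le_countP_of_idx {α : Type} (xs : List α) (p : α → Bool) (d : α)
    {i j : Nat} (hi : i < xs.length) (hj : j < xs.length) (hne : i ≠ j)
    (hpi : p (xs.getD i d) = true) (hpj : p (xs.getD j d) = true) :
    2 ≤ xs.countP p := by
  rw [pvCountP_eq_range xs p d, List.countP_eq_length_filter]
  have hi' : i ∈ (List.range xs.length).filter (fun m => p (xs.getD m d)) := by
    rw [List.mem_filter, List.mem_range]; exact ⟨hi, hpi⟩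
  have hj' : j ∈ (List.range xs.length).filter (fun m => p (xs.getD m d)) := by
    rw [List.mem_filter, List.mem_range]; exact ⟨hj, hpj⟩
  exact pvTwo_mem_length hi' hj' hne

theorem pvExists_ne_mem {l : List Nat} (hnd : l.Nodup) (h2 : 2 ≤ l.length) (k : Nat) :
    ∃ m ∈ l, m ≠ k := by
  match l, hnd, h2 with
  | a :: b :: t, hnd, _ =>
    have hab : a ≠ b := by
      rw [List.nodup_cons] at hnd
      exact fun h => hnd.1 (h ▸ List.mem_cons_self ..)
    by_cases hak : a = k
    · exact ⟨b, by simp, fun h => hab (hak.trans h.symm)⟩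
    · exact ⟨a, by simp, hak⟩

theorem pvTwo_of_nodup {l : List Nat} (hnd : l.Nodup) (h2 : 2 ≤ l.length) :
    ∃ a ∈ l, ∃ b ∈ l, a ≠ b := by
  match l, hnd, h2 with
  | a :: b :: t, hnd, _ =>
    have hab : a ≠ b := by
      rw [List.nodup_cons] at hnd
      exact fun h => hnd.1 (h ▸ List.mem_cons_self ..)
    exact ⟨a, by simp, b, by simp, hab⟩

theorem pvExists_other_of_two_le {α : Type} (xs : List α) (p : α → Bool) (d : α)
    {k : Nat} (h2 : 2 ≤ xs.countP p) :
    ∃ m < xs.length, m ≠ k ∧ p (xs.getD m d) = true := by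
  rw [pvCountP_eq_range xs p d, List.countP_eq_length_filter] at h2
  have hnd : ((List.range xs.length).filter (fun m => p (xs.getD m d))).Nodup :=
    (List.nodup_range).filter _
  obtain ⟨m, hm, hmk⟩ := pvExists_ne_mem hnd h2 k
  rw [List.mem_filter, List.mem_range] at hm
  exact ⟨m, hm.1, hmk, hm.2⟩

-- ---- the key index-level ↔ value-level equivalence ----
theorem pvKey (cliques : List (List Int)) {k : Nat} (hk : k < cliques.length) :
    (∃ m < cliques.length, m ≠ k ∧ PySem.Set.issubset (pvG cliques k) (pvG cliques m) = true)
      ↔ pvBad cliques (pvG cliques k) = true := by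
  rw [pvBadT]
  constructor
  · rintro ⟨m, hm, hmk, hsub⟩
    by_cases he : PySem.Set.equal (pvG cliques k) (pvG cliques m) = true
    · refine Or.inr (pvTwo_le_countP_of_idx cliques _ [] hk hm (fun h => hmk h.symm) ?_ ?_)
      · exact pvEqv_refl _
      · exact pvEqv_symm he
    · exact Or.inl ⟨m, hm, hsub, he⟩
  · rintro (⟨i, hi, hs, hne⟩ | hc)
    · refine ⟨i, hi, ?_, hs⟩
      rintro rfl; exact hne (pvEqv_refl _)
    · obtain ⟨m, hm, hmk, hp⟩ := pvExists_other_of_two_le cliques _ [] hc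
      exact ⟨m, hm, hmk, pvSub_of_eqv (pvEqv_symm hp)⟩

-- ---- the gathered useless list, in closed form ----
def pvU (cliques : List (List Int)) : List (List Int) :=
  (List.range cliques.length).flatMap (fun i =>
    ((List.range cliques.length).filter (fun j =>
        decide (i ≠ j ∧ PySem.Set.issubset (pvG cliques j) (pvG cliques i) = true))).map (pvG cliques))

theorem pvUseless_eq (cliques : List (List Int)) :
    (List.range cliques.length).foldl (fun acc i =>
      (List.range cliques.length).foldl (fun acc j =>
        if i ≠ j ∧ PySem.Set.issubset (cliques.getD j []) (cliques.getD i []) = true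
        then acc ++ [cliques.getD j []] else acc) acc) [] = pvU cliques := by
  have hinner : ∀ (acc : List (List Int)) (i : Nat),
      (List.range cliques.length).foldl (fun acc j =>
        if i ≠ j ∧ PySem.Set.issubset (cliques.getD j []) (cliques.getD i []) = true
        then acc ++ [cliques.getD j []] else acc) acc
      = acc ++ ((List.range cliques.length).filter (fun j =>
          decide (i ≠ j ∧ PySem.Set.issubset (cliques.getD j []) (cliques.getD i []) = true))).map
            (fun j => cliques.getD j []) :=
    fun acc i => PySem.List.foldl_append_ite _ _ _ _
  simp only [hinner]
  rw [PySem.List.foldl_append_eq_flatMap]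
  rfl

-- every gathered clique is bad
theorem pvU_bad (cliques : List (List Int)) : ∀ u ∈ pvU cliques, pvBad cliques u = true := by
  intro u hu
  simp only [pvU, List.mem_flatMap, List.mem_map, List.mem_filter, List.mem_range] at hu
  obtain ⟨i, hi, j, ⟨hj, hcond⟩, rfl⟩ := hu
  rw [decide_eq_true_eq] at hcond
  exact (pvKey cliques hj).mp ⟨i, hi, hcond.1, hcond.2⟩

theorem pvPair_le_sum {l : List Nat} {f : Nat → Nat} {a b : Nat} (hnd : l.Nodup)
    (ha : a ∈ l) (hb : b ∈ l) (hab : a ≠ b) : f a + f b ≤ (l.map f).sum := by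
  induction l with
  | nil => cases ha
  | cons x t ih =>
    rw [List.map_cons, List.sum_cons]
    rw [List.nodup_cons] at hnd
    rcases List.mem_cons.mp ha with rfl | ha'
    · have hb' : b ∈ t := (List.mem_cons.mp hb).resolve_left (fun h => hab h.symm)
      have := List.single_le_sum (l := t.map f) (fun x _ => Nat.zero_le x) _
        (List.mem_map_of_mem hb')
      omega
    · rcases List.mem_cons.mp hb with rfl | hb'
      · have := List.single_le_sum (l := t.map f) (fun x _ => Nat.zero_le x) _
          (List.mem_map_of_mem ha')
        omega
      · have := ih hnd.2 ha' hb'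
        omega

-- per-outer-index count of gathered copies of c's class
def pvF (cliques : List (List Int)) (c : List Int) (i : Nat) : Nat :=
  (List.range cliques.length).countP (fun j =>
    PySem.Set.equal (pvG cliques j) c &&
      decide (i ≠ j ∧ PySem.Set.issubset (pvG cliques j) (pvG cliques i) = true))

-- the gathered list contains each bad equality class at least as often as cliques does
theorem pvU_count (cliques : List (List Int)) (c : List Int) (hc : pvBad cliques c = true) :
    cliques.countP (fun d => PySem.Set.equal d c) ≤ (pvU cliques).countP (fun d => PySem.Set.equal d c) := by
  have hL : cliques.countP (fun d => PySem.Set.equal d c)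
      = (List.range cliques.length).countP (fun i => PySem.Set.equal (pvG cliques i) c) :=
    pvCountP_eq_range cliques _ []
  have hflat : (pvU cliques).countP (fun d => PySem.Set.equal d c)
      = ((List.range cliques.length).map (pvF cliques c)).sum := by
    rw [pvU, List.countP_flatMap]
    congr 1
    apply List.map_congr_left
    intro i _
    simp only [Function.comp]
    rw [List.countP_map, List.countP_filter]
    rfl
  rw [hflat, hL]
  rw [pvBadT] at hc
  rcases hc with ⟨i0, hi0, hs, hne⟩ | hc2
  · have h1 : (List.range cliques.length).countP (fun i => PySem.Set.equal (pvG cliques i) c)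
        ≤ pvF cliques c i0 := by
      apply List.countP_mono_left
      intro j _ hpj
      have hij : i0 ≠ j := by
        rintro rfl
        exact hne (pvEqv_symm hpj)
      have hsub : PySem.Set.issubset (pvG cliques j) (pvG cliques i0) = true :=
        pvSub_of_eqv_left hpj hs
      simp [hpj, hij, hsub]
    exact le_trans h1 (List.single_le_sum (fun x _ => Nat.zero_le x) _
      (List.mem_map_of_mem (List.mem_range.mpr hi0)))
  · rw [hL] at hc2
    have hnd : ((List.range cliques.length).filter
        (fun i => PySem.Set.equal (pvG cliques i) c)).Nodup := List.nodup_range.filter _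
    have hlen : 2 ≤ ((List.range cliques.length).filter
        (fun i => PySem.Set.equal (pvG cliques i) c)).length := by
      rw [← List.countP_eq_length_filter]; exact hc2
    obtain ⟨j0, hj0, j1, hj1, hne01⟩ := pvTwo_of_nodup hnd hlen
    have hj0' := List.mem_filter.mp hj0
    have hj1' := List.mem_filter.mp hj1
    have hA : ((List.range cliques.length).filter
        (fun i => PySem.Set.equal (pvG cliques i) c)).length - 1 ≤ pvF cliques c j0 := by
      have he := List.length_erase_of_mem hj0
      have hf : ((List.range cliques.length).filter
          (fun i => PySem.Set.equal (pvG cliques i) c)).erase j0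
          = (List.range cliques.length).filter
            (fun j => PySem.Set.equal (pvG cliques j) c && (j != j0)) := by
        rw [hnd.erase_eq_filter, List.filter_filter]; simp [Bool.and_comm]
      have h1 : ((List.range cliques.length).filter
          (fun i => PySem.Set.equal (pvG cliques i) c)).length - 1
          ≤ (List.range cliques.length).countP
            (fun j => PySem.Set.equal (pvG cliques j) c && (j != j0)) := by
        rw [List.countP_eq_length_filter, ← hf, he]
      refine le_trans h1 (List.countP_mono_left ?_)
      intro j _ hpj
      rw [Bool.and_eq_true, bne_iff_ne] at hpj
      obtain ⟨hec, hjne⟩ := hpj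
      have heq : PySem.Set.equal (pvG cliques j) (pvG cliques j0) = true :=
        pvEqv_trans hec (pvEqv_symm hj0'.2)
      simp [hec, Ne.symm hjne, pvSub_of_eqv heq]
    have hB : 1 ≤ pvF cliques c j1 := by
      have : 0 < pvF cliques c j1 := by
        apply List.countP_pos_iff.mpr
        refine ⟨j0, hj0'.1, ?_⟩
        have heq : PySem.Set.equal (pvG cliques j0) (pvG cliques j1) = true :=
          pvEqv_trans hj0'.2 (pvEqv_symm hj1'.2)
        simp [hj0'.2, Ne.symm hne01, pvSub_of_eqv heq]
      omega
    have hsum : pvF cliques c j0 + pvF cliques c j1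
        ≤ ((List.range cliques.length).map (pvF cliques c)).sum :=
      pvPair_le_sum List.nodup_range (List.mem_of_mem_filter hj0) (List.mem_of_mem_filter hj1) hne01
    rw [List.countP_eq_length_filter]
    omega

-- ---- the removal loop ----
theorem pvRemove_sublist (cs : List (List Int)) (u : List Int) : List.Sublist (removeFirstSet cs u) cs := by
  induction cs with
  | nil => simp [removeFirstSet]
  | cons c t ih =>
    simp only [removeFirstSet]
    split
    · exact (List.sublist_cons_self c t)
    · exact ih.cons₂ c

theorem pvRemove_count_eqv {cs : List (List Int)} {u c : List Int}
    (hany : cs.any (fun x => PySem.Set.equal x u) = true)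
    (hc : PySem.Set.equal u c = true) :
    (removeFirstSet cs u).countP (fun d => PySem.Set.equal d c) + 1
      = cs.countP (fun d => PySem.Set.equal d c) := by
  induction cs with
  | nil => simp at hany
  | cons x t ih =>
    simp only [removeFirstSet]
    by_cases hx : PySem.Set.equal x u = true
    · rw [if_pos hx, List.countP_cons]
      have hxc : PySem.Set.equal x c = true := pvEqv_trans hx hc
      simp [hxc]
    · rw [if_neg hx, List.countP_cons, List.countP_cons]
      have hany' : t.any (fun x => PySem.Set.equal x u) = true := by
        rw [List.any_cons] at hany
        simpa [hx] using hany
      have hxc : ¬ PySem.Set.equal x c = true := by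
        intro h
        exact hx (pvEqv_trans h (pvEqv_symm hc))
      simp only [hxc]
      have := ih hany'
      omega

theorem pvRemove_count_ne {cs : List (List Int)} {u c : List Int}
    (hc : ¬ PySem.Set.equal u c = true) :
    (removeFirstSet cs u).countP (fun d => PySem.Set.equal d c)
      = cs.countP (fun d => PySem.Set.equal d c) := by
  induction cs with
  | nil => rfl
  | cons x t ih =>
    simp only [removeFirstSet]
    by_cases hx : PySem.Set.equal x u = true
    · rw [if_pos hx, List.countP_cons]
      have hxc : ¬ PySem.Set.equal x c = true := by
        intro h
        exact hc (pvEqv_trans (pvEqv_symm hx) h)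
      simp [hxc]
    · rw [if_neg hx, List.countP_cons, List.countP_cons, ih]

theorem pvRemove_filter {cliques : List (List Int)} {cs : List (List Int)} {u : List Int}
    (hu : pvBad cliques u = true) :
    (removeFirstSet cs u).filter (fun c => !pvBad cliques c)
      = cs.filter (fun c => !pvBad cliques c) := by
  induction cs with
  | nil => rfl
  | cons x t ih =>
    simp only [removeFirstSet]
    by_cases hx : PySem.Set.equal x u = true
    · rw [if_pos hx]
      have hxb : pvBad cliques x = true := pvBad_respects (pvEqv_symm hx) hu
      rw [List.filter_cons]
      simp [hxb]
    · rw [if_neg hx, List.filter_cons, List.filter_cons, ih]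

theorem pvRemove_run (cliques : List (List Int)) :
    ∀ (U cs : List (List Int)), (∀ u ∈ U, pvBad cliques u = true) →
    (∀ c ∈ cs, pvBad cliques c = true →
        cs.countP (fun d => PySem.Set.equal d c) ≤ U.countP (fun d => PySem.Set.equal d c)) →
    U.foldl (fun cs u =>
        if cs.any (fun c => PySem.Set.equal c u) then removeFirstSet cs u else cs) cs
      = cs.filter (fun c => !pvBad cliques c) := by
  intro U
  induction U with
  | nil =>
    intro cs _ hcount
    simp only [List.foldl_nil]
    symm
    apply List.filter_eq_self.mpr
    intro c hc
    rw [Bool.not_eq_true']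
    rw [Bool.eq_false_iff, Ne]
    intro hbad
    have h1 : 0 < cs.countP (fun d => PySem.Set.equal d c) :=
      List.countP_pos_iff.mpr ⟨c, hc, pvEqv_refl c⟩
    have h2 := hcount c hc hbad
    rw [List.countP_nil] at h2
    omega
  | cons u U ih =>
    intro cs hbad hcount
    simp only [List.foldl_cons]
    by_cases hany : cs.any (fun c => PySem.Set.equal c u) = true
    · rw [if_pos hany, ih _ (fun v hv => hbad v (List.mem_cons_of_mem _ hv)) ?_]
      · exact pvRemove_filter (hbad u List.mem_cons_self)
      · intro c hcmem hcbad
        have hcs : c ∈ cs := (pvRemove_sublist cs u).subset hcmem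
        have h0 := hcount c hcs hcbad
        rw [List.countP_cons] at h0
        by_cases huc : PySem.Set.equal u c = true
        · have h1 := pvRemove_count_eqv (cs := cs) hany huc
          simp [huc] at h0
          omega
        · rw [pvRemove_count_ne huc]
          simp [huc] at h0
          exact h0
    · rw [if_neg hany]
      apply ih _ (fun v hv => hbad v (List.mem_cons_of_mem _ hv))
      intro c hcs hcbad
      have huc : ¬ PySem.Set.equal u c = true := by
        intro h
        apply hany
        exact List.any_eq_true.mpr ⟨c, hcs, pvEqv_symm h⟩
      have h0 := hcount c hcs hcbad
      rw [List.countP_cons] at h0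
      simp [huc] at h0
      exact h0

-- ---- the two ports, in the common closed form ----
theorem pvA_eq (cliques : List (List Int)) :
    minimizeCliques cliques = cliques.filter (fun c => !pvBad cliques c) := by
  show ((List.range cliques.length).foldl (fun acc i =>
      (List.range cliques.length).foldl (fun acc j =>
        if i ≠ j ∧ PySem.Set.issubset (cliques.getD j []) (cliques.getD i []) = true
        then acc ++ [cliques.getD j []] else acc) acc) []).foldl (fun cs u =>
      if cs.any (fun c => PySem.Set.equal c u) then removeFirstSet cs u else cs) cliques = _
  rw [pvUseless_eq]
  exact pvRemove_run cliques (pvU cliques) cliques (pvU_bad cliques)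
    (fun c _ hc => pvU_count cliques c hc)

-- ---- facts about the canonical frozenset representative ----
theorem pvFz_mem (c : List Int) (x : Int) : x ∈ pvFz c ↔ x ∈ c := by
  rw [pvFz, PySem.List.mem_sorted, PySem.Set.mem_ofList]

theorem pvFz_eq_iff (a b : List Int) : pvFz a = pvFz b ↔ PySem.Set.equal a b = true := by
  rw [pvFz, pvFz, PySem.List.sorted_id_eq_sorted_id_iff_perm,
      List.perm_ext_iff_of_nodup (PySem.Set.nodup_ofList a) (PySem.Set.nodup_ofList b),
      PySem.Set.equal_iff]
  simp [PySem.Set.mem_ofList]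

theorem pvFz_sub (a b : List Int) :
    PySem.Set.issubset (pvFz a) (pvFz b) = PySem.Set.issubset a b := by
  rw [Bool.eq_iff_iff, PySem.Set.issubset_iff, PySem.Set.issubset_iff]
  constructor
  · intro h x hx
    exact (pvFz_mem b x).mp (h x ((pvFz_mem a x).mpr hx))
  · intro h x hx
    exact (pvFz_mem b x).mpr (h x ((pvFz_mem a x).mp hx))

-- the index-level first disjunct of pvBad, value-wise
theorem pvIdx_val (cliques : List (List Int)) (P : List Int → Prop) :
    (∃ i < cliques.length, P (pvG cliques i)) ↔ ∃ d ∈ cliques, P d := by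
  constructor
  · rintro ⟨i, hi, h⟩
    exact ⟨cliques[i], List.getElem_mem hi, by
      rwa [pvG, List.getD_eq_getElem cliques [] hi] at h⟩
  · rintro ⟨d, hd, h⟩
    obtain ⟨i, hi, rfl⟩ := List.mem_iff_getElem.mp hd
    exact ⟨i, hi, by rwa [pvG, List.getD_eq_getElem cliques [] hi]⟩

theorem pvFz_beq (a b : List Int) : (pvFz a == pvFz b) = PySem.Set.equal a b := by
  by_cases h : pvFz a = pvFz b
  · simp [h, (pvFz_eq_iff a b).mp h]
  · have h2 : PySem.Set.equal a b ≠ true := fun he => h ((pvFz_eq_iff a b).mpr he)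
    simp [h, Bool.eq_false_iff.mpr h2]

theorem pvB_eq (cliques : List (List Int)) :
    minimizeCliques_alt cliques = cliques.filter (fun c => !pvBad cliques c) := by
  unfold minimizeCliques_alt
  dsimp only
  rw [← List.map_prod_left_eq_zip, List.filter_map, List.map_map]
  have hcomp : ((fun p : List Int × List Int => p.1) ∘ fun c => (c, pvFz c)) = id := rfl
  rw [hcomp, List.map_id]
  apply List.filter_congr
  intro c hc
  simp only [Function.comp_apply]
  rw [Bool.eq_iff_iff, Bool.and_eq_true, Bool.not_eq_true', Bool.not_eq_true']
  have hcount : (cliques.map pvFz).count (pvFz c) = cliques.countP (fun d => PySem.Set.equal d c) := by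
    rw [List.count_eq_countP, List.countP_map]
    apply List.countP_congr
    intro d _
    simp only [Function.comp_apply]
    rw [pvFz_beq d c]
  have hone : 1 ≤ cliques.countP (fun d => PySem.Set.equal d c) :=
    List.countP_pos_iff.mpr ⟨c, hc, pvEqv_refl c⟩
  have hany : (cliques.map pvFz).any (fun g => PySem.Set.issubset (pvFz c) g && !(pvFz c == g)) = true
      ↔ (∃ i < cliques.length, PySem.Set.issubset c (pvG cliques i) = true
          ∧ ¬ (PySem.Set.equal c (pvG cliques i) = true)) := by
    rw [List.any_map, List.any_eq_true,
        pvIdx_val cliques (fun d => PySem.Set.issubset c d = true ∧ ¬ (PySem.Set.equal c d = true))]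
    apply exists_congr; intro d
    apply and_congr_right; intro _
    simp only [Function.comp_apply]
    rw [Bool.and_eq_true, Bool.not_eq_true', pvFz_sub, pvFz_beq, Bool.eq_false_iff, Ne]
  constructor
  · rintro ⟨h1, h2⟩
    rw [beq_iff_eq, hcount] at h1
    rw [Bool.eq_false_iff, Ne, pvBadT]
    rintro (hsup | h2c)
    · have ht := hany.mpr hsup
      rw [ht] at h2
      exact Bool.noConfusion h2
    · omega
  · intro h
    rw [Bool.eq_false_iff, Ne, pvBadT] at h
    refine ⟨?_, ?_⟩
    · rw [beq_iff_eq, hcount]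
      by_contra hne
      exact h (Or.inr (by omega))
    · rw [Bool.eq_false_iff, Ne, hany]
      exact fun hsup => h (Or.inl hsup)

-- ===== VERDICT (by name: the statement is the Claim_ definition above) =====
theorem minimizeCliques_spec : Claim_equal_minimizeCliques := by
  intro cliques _
  unfold Spec_minimizeCliques
  rw [pvA_eq, pvB_eq]
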